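-- pv_equiv track=rewrite | github.com/aisitei/aisitei.github.io | report_pipeline/step2c_merge.py | _has_internal_repetition
-- ===== SOURCE A (Python) =====
-- def _has_internal_repetition(text: str, min_repeats: int = 4) -> bool:
--     t = text.strip().replace(" ", "")
--     if len(t) < 10:
--         return False
--     max_plen = min(21, len(t) // min_repeats + 1)
--     for plen in range(2, max_plen):
--         for start in range(min(plen, len(t) - plen * min_repeats + 1)):
--             phrase = t[start:start + plen]
--             count = 0
--             i = start
--             while i + plen <= len(t) and t[i:i + plen] == phrase:
--                 count += 1
--                 i += plen
--             if count >= min_repeats: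
--                 return True
--     return False
-- ===== SOURCE B (Python) =====
-- def _has_internal_repetition(text: str, min_repeats: int = 4) -> bool:
--     t = text.strip().replace(" ", "")
--     n = len(t)
--     if n < 10:
--         return False
--     max_plen = min(21, n // min_repeats + 1)
--     for plen in range(2, max_plen):
--         limit = min(plen, n - plen * min_repeats + 1)
--         need = plen * (min_repeats - 1)
--         run = 0  # length of the current chain of positions j with t[j] == t[j + plen]
--         for j in range(n - 1, -1, -1):
--             run = run + 1 if j + plen < n and t[j] == t[j + plen] else 0
--             if j < limit and run >= need:
--                 return True
--     return False
-- ===== Notes on version B (the rewrite author's own statement) =====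
-- stated objective: alternative
-- what changed: Instead of extracting a candidate phrase and counting equal blocks per start, B makes one backward character-shift pass per pattern length: it maintains the run length of consecutive positions j with t[j]==t[j+plen] and reports a repetition as soon as some admissible start carries a run of plen*(min_repeats-1) matches (repeated blocks = periodicity of the window under a shift by the block length).
-- outside the precondition, e.g. on _has_internal_repetition('abcdefghijkl', 0): A raises ZeroDivisionError, B raises ZeroDivisionError
import Mathlib
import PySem

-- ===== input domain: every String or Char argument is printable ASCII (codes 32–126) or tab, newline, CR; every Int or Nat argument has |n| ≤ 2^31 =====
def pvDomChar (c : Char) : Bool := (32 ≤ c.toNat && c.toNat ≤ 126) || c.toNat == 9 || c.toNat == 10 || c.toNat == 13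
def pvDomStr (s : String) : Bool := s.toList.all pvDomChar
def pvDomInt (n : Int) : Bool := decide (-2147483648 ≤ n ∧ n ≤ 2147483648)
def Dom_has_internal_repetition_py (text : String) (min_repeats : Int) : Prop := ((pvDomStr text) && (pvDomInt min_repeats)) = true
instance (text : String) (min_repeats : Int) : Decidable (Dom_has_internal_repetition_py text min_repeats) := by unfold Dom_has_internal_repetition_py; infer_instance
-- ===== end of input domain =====

-- B replaces A's per-start block-extraction-and-counting by a single backward character-shift
-- scan per pattern length (run length of positions j with t[j] == t[j+plen]), via the
-- periodicity characterisation of repeated blocks (objective: alternative).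

-- shared preprocessing: text.strip().replace(" ", "")
def hirT (text : String) : List Char :=
  PySem.Chars.replace (PySem.Chars.strip text.toList) [' '] []

-- ===== PORT A =====
-- the while loop: count consecutive blocks equal to phrase starting at i (fuel ≥ len+1 suffices since plen ≥ 2)
def hirCountA (t phrase : List Char) (plen : Int) : Nat → Int → Int
  | 0, _ => 0
  | fuel + 1, i =>
      if i + plen ≤ (t.length : Int) ∧ PySem.List.slice t (some i) (some (i + plen)) = phrase
      then hirCountA t phrase plen fuel (i + plen) + 1
      else 0

-- inner for-loop over start, with early return True
def hirStartsA (t : List Char) (mr plen : Int) : List Int → Bool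
  | [] => false
  | start :: rest =>
      let phrase := PySem.List.slice t (some start) (some (start + plen))
      let count := hirCountA t phrase plen (t.length + 1) start
      if mr ≤ count then true else hirStartsA t mr plen rest

-- outer for-loop over plen
def hirPlensA (t : List Char) (mr : Int) : List Int → Bool
  | [] => false
  | plen :: rest =>
      if hirStartsA t mr plen
           (PySem.List.pyRange 0 (min plen ((t.length : Int) - plen * mr + 1)) 1)
      then true
      else hirPlensA t mr rest

def has_internal_repetition_py (text : String) (min_repeats : Int) : Bool :=
  let t := hirT text
  if (t.length : Int) < 10 then false
  else
    let max_plen := min 21 (PySem.Int.floordiv (t.length : Int) min_repeats + 1)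
    hirPlensA t min_repeats (PySem.List.pyRange 2 max_plen 1)

-- ===== PORT B =====
-- the backward j-loop: run is the current chain of shift-matches; early return True
def hirScanB (t : List Char) (plen limit need : Int) : List Int → Int → Bool
  | [], _ => false
  | j :: rest, run =>
      let run' := if j + plen < (t.length : Int) ∧
                     PySem.List.pyGet? t j = PySem.List.pyGet? t (j + plen)
                  then run + 1 else 0
      if j < limit ∧ need ≤ run' then true else hirScanB t plen limit need rest run'

-- outer for-loop over plen
def hirPlensB (t : List Char) (mr : Int) : List Int → Bool
  | [] => false
  | plen :: rest =>
      if hirScanB t plen (min plen ((t.length : Int) - plen * mr + 1)) (plen * (mr - 1))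
           (PySem.List.pyRange ((t.length : Int) - 1) (-1) (-1)) 0
      then true
      else hirPlensB t mr rest

def has_internal_repetition_py_alt (text : String) (min_repeats : Int) : Bool :=
  let t := hirT text
  if (t.length : Int) < 10 then false
  else
    let max_plen := min 21 (PySem.Int.floordiv (t.length : Int) min_repeats + 1)
    hirPlensB t min_repeats (PySem.List.pyRange 2 max_plen 1)

-- ===== PRECONDITION & SPEC =====
-- Pre_ excludes only min_repeats = 0 on texts whose stripped, space-free form has length ≥ 10:
-- there both A and B raise ZeroDivisionError on len(t) // min_repeats.
def Pre_has_internal_repetition_py (text : String) (min_repeats : Int) : Prop :=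
  min_repeats ≠ 0 ∨ ((hirT text).length : Int) < 10
instance (text : String) (min_repeats : Int) : Decidable (Pre_has_internal_repetition_py text min_repeats) := by unfold Pre_has_internal_repetition_py; infer_instance
def pvWitness_has_internal_repetition_py : String × Int := ("abcabcabcabc", 4)

def Spec_has_internal_repetition_py (text : String) (min_repeats : Int) (out : Bool) : Prop := out = has_internal_repetition_py_alt text min_repeats
instance (text : String) (min_repeats : Int) (out : Bool) : Decidable (Spec_has_internal_repetition_py text min_repeats out) := by unfold Spec_has_internal_repetition_py; infer_instance

-- ===== CLAIM (what is proved, stated in full; the proofs are below) =====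
def Claim_equal_has_internal_repetition_py : Prop := ∀ (text : String) (min_repeats : Int), Dom_has_internal_repetition_py text min_repeats → Pre_has_internal_repetition_py text min_repeats → Spec_has_internal_repetition_py text min_repeats (has_internal_repetition_py text min_repeats)

-- ===== LEMMAS AND PROOFS =====

-- mathematical model of B's run: chain length of shift-matches starting at j
def hirChain (t : List Char) (p : Nat) (j : Nat) : Nat :=
  if h : j + p < t.length ∧ t[j]? = t[j + p]? then hirChain t p (j + 1) + 1 else 0
termination_by t.length - j
decreasing_by omega

theorem hirChain_ge_iff (t : List Char) (p : Nat) :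
    ∀ (c j : Nat), (c ≤ hirChain t p j ↔
      ∀ i < c, (j + i) + p < t.length ∧ t[j + i]? = t[j + i + p]?) := by
  intro c
  induction c with
  | zero => intro j; simp
  | succ c ih =>
      intro j
      rw [hirChain]
      by_cases h : j + p < t.length ∧ t[j]? = t[j + p]?
      · rw [dif_pos h]
        constructor
        · intro hle i hi
          rcases Nat.eq_zero_or_pos i with rfl | hi0
          · simpa using h
          · obtain ⟨i', rfl⟩ : ∃ i', i = i' + 1 := ⟨i - 1, by omega⟩
            have := (ih (j + 1)).mp (by omega) i' (by omega)
            constructor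
            · have := this.1; omega
            · have h2 := this.2
              have e1 : j + 1 + i' = j + (i' + 1) := by omega
              have e2 : j + 1 + i' + p = j + (i' + 1) + p := by omega
              rw [e1] at h2; exact h2
        · intro hall
          have : c ≤ hirChain t p (j + 1) := by
            rw [ih (j + 1)]
            intro i hi
            have := hall (i + 1) (by omega)
            have e1 : j + 1 + i = j + (i + 1) := by omega
            have e2 : j + 1 + i + p = j + (i + 1) + p := by omega
            rw [e1]; exact this
          omega
      · rw [dif_neg h]
        constructor
        · omega
        · intro hall
          exact absurd (by simpa using hall 0 (by omega)) h

theorem hirChain_len (t : List Char) (p : Nat) : hirChain t p t.length = 0 := by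
  rw [hirChain, dif_neg]; omega

-- B's scan loop over [m-1, m-2, …, 0] with run = hirChain m decides the existential
theorem hirScanB_eq (t : List Char) (p : Nat) (limit need : Int) :
    ∀ m : Nat,
      hirScanB t (p : Int) limit need (PySem.List.pyRange ((m : Int) - 1) (-1) (-1))
          ((hirChain t p m : Nat) : Int)
        = decide (∃ j : Nat, j < m ∧ (j : Int) < limit ∧ need ≤ (hirChain t p j : Int)) := by
  intro m
  induction m with
  | zero =>
      rw [PySem.List.pyRange_neg_one_eq_nil (by omega)]
      simp [hirScanB]
  | succ m ih =>
      have hcons : PySem.List.pyRange (((m + 1 : Nat) : Int) - 1) (-1) (-1)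
          = (m : Int) :: PySem.List.pyRange ((m : Int) - 1) (-1) (-1) := by
        have : (((m + 1 : Nat) : Int) - 1) = (m : Int) := by push_cast; ring
        rw [this, PySem.List.pyRange_neg_one_cons (by omega)]
      rw [hcons]
      simp only [hirScanB]
      have hcond : ((m : Int) + (p : Int) < (t.length : Int) ∧
            PySem.List.pyGet? t (m : Int) = PySem.List.pyGet? t ((m : Int) + (p : Int)))
          ↔ (m + p < t.length ∧ t[m]? = t[m + p]?) := by
        have e : (m : Int) + (p : Int) = ((m + p : Nat) : Int) := by push_cast; ring
        rw [e, PySem.List.pyGet?_natCast, PySem.List.pyGet?_natCast]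
        constructor
        · rintro ⟨h1, h2⟩; exact ⟨by exact_mod_cast h1, h2⟩
        · rintro ⟨h1, h2⟩; exact ⟨by exact_mod_cast h1, h2⟩
      have hrun : (if (m : Int) + (p : Int) < (t.length : Int) ∧
            PySem.List.pyGet? t (m : Int) = PySem.List.pyGet? t ((m : Int) + (p : Int))
          then ((hirChain t p (m + 1) : Nat) : Int) + 1 else 0) = ((hirChain t p m : Nat) : Int) := by
        conv_rhs => rw [hirChain]
        by_cases h : m + p < t.length ∧ t[m]? = t[m + p]?
        · rw [if_pos (hcond.mpr h), dif_pos h]; push_cast; ring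
        · rw [if_neg (fun hc => h (hcond.mp hc)), dif_neg h]; simp
      rw [hrun]
      by_cases hb : (m : Int) < limit ∧ need ≤ ((hirChain t p m : Nat) : Int)
      · rw [if_pos hb]
        exact (decide_eq_true ⟨m, by omega, hb.1, hb.2⟩).symm
      · rw [if_neg hb, ih]
        congr 1
        simp only [eq_iff_iff]
        constructor
        · rintro ⟨j, hj, h1, h2⟩; exact ⟨j, by omega, h1, h2⟩
        · rintro ⟨j, hj, h1, h2⟩
          rcases Nat.lt_succ_iff_lt_or_eq.mp hj with h | rfl
          · exact ⟨j, h, h1, h2⟩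
          · exact absurd ⟨h1, h2⟩ hb

theorem hirCountA_nonneg (t phrase : List Char) (plen : Int) :
    ∀ (fuel : Nat) (i : Int), 0 ≤ hirCountA t phrase plen fuel i := by
  intro fuel
  induction fuel with
  | zero => intro i; simp [hirCountA]
  | succ f ih =>
      intro i
      simp only [hirCountA]
      split
      · have := ih (i + plen); omega
      · omega

-- "count ≥ k" is "the first k blocks all equal phrase"
theorem hirCountA_ge_iff (t phrase : List Char) (p : Nat) (hp : 1 ≤ p)
    (hph : phrase.length = p) :
    ∀ (k i fuel : Nat), i + p * k ≤ t.length → t.length + 1 - i ≤ fuel →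
      (((k : Int) ≤ hirCountA t phrase (p : Int) fuel (i : Int)) ↔
        (t.drop i).take (p * k) = (List.replicate k phrase).flatten) := by
  intro k
  induction k with
  | zero =>
      intro i fuel _ _
      have := hirCountA_nonneg t phrase (p : Int) fuel (i : Int)
      simp only [Nat.mul_zero, List.take_zero, List.replicate_zero, List.flatten_nil]
      constructor
      · intro _; trivial
      · intro _; exact_mod_cast this
  | succ k ih =>
      intro i fuel hb hf
      have hip : i + p ≤ t.length := by
        have : p ≤ p * (k + 1) := Nat.le_mul_of_pos_right p (Nat.succ_pos k)
        omega
      obtain ⟨f, rfl⟩ : ∃ f, fuel = f + 1 := ⟨fuel - 1, by omega⟩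
      have hcond : (i : Int) + (p : Int) ≤ (t.length : Int) := by exact_mod_cast hip
      have hslice : PySem.List.slice t (some (i : Int)) (some ((i : Int) + (p : Int))) =
          (t.drop i).take p := by
        rw [PySem.List.slice_natCast_add]
      simp only [hirCountA, hslice, hcond, true_and]
      have hflat : (List.replicate (k + 1) phrase).flatten =
          phrase ++ (List.replicate k phrase).flatten := by
        simp [List.replicate_succ]
      have htake : (t.drop i).take (p * (k + 1)) =
          (t.drop i).take p ++ (t.drop (i + p)).take (p * k) := by
        have : p * (k + 1) = p + p * k := by ring
        rw [this, List.take_add, List.drop_drop]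
      have hpk : p * (k + 1) = p + p * k := by ring
      by_cases hc : (t.drop i).take p = phrase
      · rw [if_pos hc]
        have hih := ih (i + p) f (by omega) (by omega)
        constructor
        · intro hle
          rw [htake, hc, hflat]
          have : (k : Int) ≤ hirCountA t phrase (p : Int) f ((i : Int) + (p : Int)) := by
            push_cast at hle ⊢
            omega
          rw [show ((i : Int) + (p : Int)) = (((i + p : Nat)) : Int) by push_cast; ring] at this
          exact congrArg (phrase ++ ·) (hih.mp this)
        · intro heq
          rw [htake, hc, hflat] at heq
          have heq' := List.append_cancel_left heq
          have : (k : Int) ≤ hirCountA t phrase (p : Int) f (((i + p : Nat)) : Int) :=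
            hih.mpr heq'
          rw [show (((i + p : Nat)) : Int) = (i : Int) + (p : Int) by push_cast; ring] at this
          push_cast
          omega
      · rw [if_neg hc]
        constructor
        · intro hle
          exfalso
          have : (0 : Int) < (k : Int) + 1 := by positivity
          push_cast at hle
          omega
        · intro heq
          exfalso
          apply hc
          have h1 := congrArg (List.take p) heq
          rw [List.take_take, hflat, List.take_append_of_le_length (by omega)] at h1
          have h2 : List.take p phrase = phrase := List.take_of_length_le (by omega)
          have h3 : min p (p * (k + 1)) = p := by
            have : p ≤ p * (k + 1) := Nat.le_mul_of_pos_right p (Nat.succ_pos k)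
            omega
          rw [h2, h3] at h1
          exact h1

-- "first k blocks all equal the first" is p-periodicity over the window
theorem hirPeriodicity (t : List Char) (p : Nat) (_hp : 1 ≤ p) :
    ∀ (k s : Nat), 1 ≤ k → s + p * k ≤ t.length →
      ((t.drop s).take (p * k) = (List.replicate k ((t.drop s).take p)).flatten ↔
        ∀ i < p * (k - 1), t[s + i]? = t[s + i + p]?) := by
  intro k
  induction k with
  | zero => intro s h; omega
  | succ k ih =>
      intro s _ hb
      rcases Nat.eq_zero_or_pos k with rfl | hk1
      · constructor
        · intro _ i hi; omega
        · intro _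
          simp [List.replicate_succ]
      · -- k ≥ 1
        have hsp : s + p ≤ t.length := by nlinarith
        have hs2p : s + p + p * k ≤ t.length := by nlinarith
        have hflat : (List.replicate (k + 1) ((t.drop s).take p)).flatten =
            (t.drop s).take p ++ (List.replicate k ((t.drop s).take p)).flatten := by
          simp [List.replicate_succ]
        have htake : (t.drop s).take (p * (k + 1)) =
            (t.drop s).take p ++ (t.drop (s + p)).take (p * k) := by
          have : p * (k + 1) = p + p * k := by ring
          rw [this, List.take_add, List.drop_drop]
        have hpk0 : p ≤ p * k := Nat.le_mul_of_pos_right p hk1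
        have hlen1 : ((t.drop s).take p).length = p := by
          rw [List.length_take, List.length_drop]; omega
        have hlen2 : ((t.drop (s + p)).take p).length = p := by
          rw [List.length_take, List.length_drop]; omega
        -- phrase equality at the first block = charwise condition on [0, p)
        have hblock : ((t.drop s).take p = (t.drop (s + p)).take p) ↔
            (∀ i < p, t[s + i]? = t[s + i + p]?) := by
          rw [List.ext_getElem?_iff]
          constructor
          · intro h i hi
            have := h i
            rw [List.getElem?_take, List.getElem?_drop, List.getElem?_take,
                List.getElem?_drop] at this
            simp only [hi, if_pos] at this
            rw [show s + p + i = s + i + p by omega] at this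
            exact this
          · intro h i
            rw [List.getElem?_take, List.getElem?_drop, List.getElem?_take,
                List.getElem?_drop]
            by_cases hi : i < p
            · simp only [hi, if_pos]
              rw [show s + p + i = s + i + p by omega]
              exact h i hi
            · simp [hi]
        -- step 1: whole equality ⟺ first-block shift ∧ shifted equality
        have hstep : ((t.drop s).take (p * (k + 1)) =
              (List.replicate (k + 1) ((t.drop s).take p)).flatten) ↔
            (((t.drop s).take p = (t.drop (s + p)).take p) ∧
              (t.drop (s + p)).take (p * k) =
                (List.replicate k ((t.drop (s + p)).take p)).flatten) := by
          rw [htake, hflat]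
          constructor
          · intro h
            have h' := List.append_cancel_left h
            -- h' : (t.drop (s+p)).take (p*k) = flatten (replicate k phrase_s)
            have hfirst : (t.drop (s + p)).take p = (t.drop s).take p := by
              have h1 := congrArg (List.take p) h'
              rw [List.take_take, Nat.min_eq_left hpk0] at h1
              rcases k with _ | k'
              · omega
              · rw [List.replicate_succ, List.flatten_cons,
                    List.take_append_of_le_length (by rw [hlen1])] at h1
                rw [h1, List.take_take, Nat.min_self]
            exact ⟨hfirst.symm, by rw [hfirst]; exact h'⟩
          · rintro ⟨h1, h2⟩
            rw [h2, h1]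
        rw [hstep, hblock, ih (s + p) hk1 hs2p]
        constructor
        · rintro ⟨h1, h2⟩ i hi
          by_cases hip : i < p
          · exact h1 i hip
          · have hx : p * (k + 1 - 1) = p + p * (k - 1) := by
              rcases k with _ | k'
              · omega
              · simp [Nat.mul_succ]; omega
            have := h2 (i - p) (by omega)
            rw [show s + p + (i - p) = s + i by omega] at this
            exact this
        · intro h
          constructor
          · intro i hi
            apply h
            have hx : p * (k + 1 - 1) = p * k := by simp
            omega
          · intro i hi
            have := h (p + i) (by
              have hx : p * (k + 1 - 1) = p + p * (k - 1) := by
                rcases k with _ | k'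
                · omega
                · simp [Nat.mul_succ]; omega
              omega)
            rw [show s + (p + i) = s + p + i by omega] at this
            exact this

-- per-start: A's count condition ⟺ B's chain condition
theorem hirCount_iff_chain (t : List Char) (mr plen : Int) (hmr : 1 ≤ mr) (h2 : 2 ≤ plen)
    (s : Nat) (hsb : (s : Int) + plen * mr ≤ (t.length : Int)) :
    (mr ≤ hirCountA t (PySem.List.slice t (some (s : Int)) (some ((s : Int) + plen))) plen
        (t.length + 1) (s : Int)) ↔
      (plen * (mr - 1) ≤ ((hirChain t plen.toNat s : Nat) : Int)) := by
  lift plen to Nat using (by omega) with p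
  lift mr to Nat using (by omega) with k
  have h2' : 2 ≤ p := by exact_mod_cast h2
  have hk1 : 1 ≤ k := by exact_mod_cast hmr
  have hsb' : s + p * k ≤ t.length := by exact_mod_cast hsb
  have e2 : PySem.List.slice t (some (s : Int)) (some ((s : Int) + (p : Int))) =
      List.take p (List.drop s t) := by rw [PySem.List.slice_natCast_add]
  have hph : (List.take p (List.drop s t)).length = p := by
    rw [List.length_take, List.length_drop]
    have : p ≤ p * k := Nat.le_mul_of_pos_right p (by omega)
    omega
  rw [e2, hirCountA_ge_iff t _ p (by omega) hph k s (t.length + 1) hsb' (by omega),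
      hirPeriodicity t p (by omega) k s hk1 hsb']
  have ecast : (p : Int) * ((k : Int) - 1) = ((p * (k - 1) : Nat) : Int) := by
    push_cast [Nat.cast_sub hk1]; ring
  rw [ecast, Int.toNat_natCast, Nat.cast_le, hirChain_ge_iff t p (p * (k - 1)) s]
  constructor
  · intro h i hi
    refine ⟨?_, h i hi⟩
    have : i + p < p * k := by
      rcases k with _ | k'
      · omega
      · simp at hi ⊢
        nlinarith
    omega
  · intro h i hi
    exact (h i hi).2

-- A's start loop with early return is an any
theorem hirStartsA_eq_any (t : List Char) (mr plen : Int) :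
    ∀ S : List Int, hirStartsA t mr plen S =
      S.any (fun start => decide (mr ≤ hirCountA t
        (PySem.List.slice t (some start) (some (start + plen))) plen (t.length + 1) start)) := by
  intro S
  induction S with
  | nil => simp [hirStartsA]
  | cons s rest ih =>
      simp only [hirStartsA, List.any_cons, ih]
      by_cases hc : mr ≤ hirCountA t (PySem.List.slice t (some s) (some (s + plen))) plen
          (t.length + 1) s
      · simp [hc]
      · simp [hc]

-- per-plen equality of A's inner loop and B's scan
theorem hirPerPlen (t : List Char) (mr plen : Int) (hmr : 1 ≤ mr) (h2 : 2 ≤ plen) :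
    hirStartsA t mr plen
        (PySem.List.pyRange 0 (min plen ((t.length : Int) - plen * mr + 1)) 1) =
      hirScanB t plen (min plen ((t.length : Int) - plen * mr + 1)) (plen * (mr - 1))
        (PySem.List.pyRange ((t.length : Int) - 1) (-1) (-1)) 0 := by
  set limit := min plen ((t.length : Int) - plen * mr + 1) with hlim
  -- RHS via the scan lemma, noting 0 = chain at t.length
  have hrhs : hirScanB t plen limit (plen * (mr - 1))
      (PySem.List.pyRange ((t.length : Int) - 1) (-1) (-1)) 0 =
      decide (∃ j : Nat, j < t.length ∧ (j : Int) < limit ∧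
        plen * (mr - 1) ≤ ((hirChain t plen.toNat j : Nat) : Int)) := by
    have hp : plen = ((plen.toNat : Nat) : Int) := by omega
    have hsc := hirScanB_eq t plen.toNat limit (plen * (mr - 1)) t.length
    rw [hirChain_len, Nat.cast_zero, ← hp] at hsc
    exact hsc
  rw [hrhs, hirStartsA_eq_any]
  rw [Bool.eq_iff_iff, List.any_eq_true, decide_eq_true_eq]
  constructor
  · rintro ⟨start, hmem, hdec⟩
    rw [PySem.List.mem_pyRange_one] at hmem
    obtain ⟨h0, hlt⟩ := hmem
    lift start to Nat using h0 with j
    have hsb : (j : Int) + plen * mr ≤ (t.length : Int) := by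
      have : (j : Int) < (t.length : Int) - plen * mr + 1 := lt_of_lt_of_le hlt (by omega)
      omega
    refine ⟨j, ?_, hlt, ?_⟩
    · have : (j : Int) < (t.length : Int) := by nlinarith
      exact_mod_cast this
    · exact (hirCount_iff_chain t mr plen hmr h2 j hsb).mp (by exact_mod_cast decide_eq_true_eq.mp hdec)
  · rintro ⟨j, _, hlt, hch⟩
    have hsb : (j : Int) + plen * mr ≤ (t.length : Int) := by
      have : (j : Int) < (t.length : Int) - plen * mr + 1 := lt_of_lt_of_le hlt (by omega)
      omega
    refine ⟨(j : Int), ?_, ?_⟩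
    · rw [PySem.List.mem_pyRange_one]
      exact ⟨by positivity, hlt⟩
    · exact decide_eq_true_eq.mpr ((hirCount_iff_chain t mr plen hmr h2 j hsb).mpr hch)

-- outer loops agree plen by plen
theorem hirPlens_eq (t : List Char) (mr : Int) (hmr : 1 ≤ mr) :
    ∀ L : List Int, (∀ p ∈ L, 2 ≤ p) → hirPlensA t mr L = hirPlensB t mr L := by
  intro L
  induction L with
  | nil => intro _; simp [hirPlensA, hirPlensB]
  | cons plen rest ih =>
      intro h
      have h2 := h plen (List.mem_cons_self ..)
      simp only [hirPlensA, hirPlensB]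
      rw [hirPerPlen t mr plen hmr h2, ih (fun x hx => h x (List.mem_cons_of_mem _ hx))]

-- ===== VERDICT (by name: the statement is the Claim_ definition above) =====
theorem has_internal_repetition_py_spec : Claim_equal_has_internal_repetition_py := by
  intro text mr _hdom hpre
  unfold Spec_has_internal_repetition_py
  unfold has_internal_repetition_py has_internal_repetition_py_alt
  by_cases hlen : ((hirT text).length : Int) < 10
  · simp [hlen]
  · have hmr : mr ≠ 0 := by
      rcases hpre with h | h
      · exact h
      · exact absurd h hlen
    simp only [hlen]
    rcases lt_or_gt_of_ne hmr with hneg | hpos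
    · -- min_repeats < 0: len(t) // min_repeats ≤ -1, so range(2, max_plen) is empty on both sides
      have hq : PySem.Int.floordiv ((hirT text).length : Int) mr ≤ -1 := by
        have hdm := PySem.Int.floordiv_mul_add_mod ((hirT text).length : Int) mr
        have hmb := PySem.Int.mod_neg_bounds (a := ((hirT text).length : Int)) (b := mr) hneg
        nlinarith [hmb.1, hmb.2]
      have hnil : PySem.List.pyRange 2
          (min 21 (PySem.Int.floordiv ((hirT text).length : Int) mr + 1)) 1 = [] :=
        PySem.List.pyRange_one_eq_nil (by omega)
      rw [hnil]
      simp [hirPlensA, hirPlensB]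
    · exact hirPlens_eq (hirT text) mr hpos _ (by
        intro p hp
        rw [PySem.List.mem_pyRange_one] at hp
        exact hp.1)
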